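-- pv_equiv track=rewrite | github.com/tayque/horariux | Trabajo Final/horarios/generator.py | _split_hours
-- ===== SOURCE A (Python) =====
-- def _split_hours(total_hours: int) -> list[int]:
--     if total_hours <= 0:
--         return []
--     if total_hours == 3:
--         return [3]
--     sessions = []
--     remaining = total_hours
--     while remaining > 0:
--         if remaining >= 3 and remaining != 4:
--             sessions.append(3)
--             remaining -= 3
--         else:
--             sessions.append(2)
--             remaining -= 2
--     return sorted(sessions, reverse=True)
-- ===== SOURCE B (Python) =====
-- def _split_hours(total_hours: int) -> list[int]:
--     if total_hours <= 0:
--         return []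
--     if total_hours == 1:
--         return [2]
--     r = total_hours % 3
--     twos = 0 if r == 0 else (1 if r == 2 else 2)
--     threes = (total_hours - 2 * twos) // 3
--     return [3] * threes + [2] * twos
-- ===== Notes on version B (the rewrite author's own statement) =====
-- stated objective: simpler
-- what changed: Replaces the greedy while-loop plus reverse sort with a closed-form count of 3-hour and 2-hour sessions from total_hours mod 3, building the descending list directly.
import Mathlib
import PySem

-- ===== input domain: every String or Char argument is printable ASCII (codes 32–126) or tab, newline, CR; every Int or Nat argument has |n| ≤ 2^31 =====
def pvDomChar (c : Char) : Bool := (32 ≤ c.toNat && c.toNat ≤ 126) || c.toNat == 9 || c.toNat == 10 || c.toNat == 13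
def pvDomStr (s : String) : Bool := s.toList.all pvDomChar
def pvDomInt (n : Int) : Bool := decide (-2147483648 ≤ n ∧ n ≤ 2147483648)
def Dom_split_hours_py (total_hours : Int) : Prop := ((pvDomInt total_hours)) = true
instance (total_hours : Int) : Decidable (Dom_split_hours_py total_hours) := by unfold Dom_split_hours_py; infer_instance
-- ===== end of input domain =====

-- B replaces A's greedy while-loop + reverse sort with a closed-form count of 3s and 2s (objective: simpler).

-- ===== PORT A =====
-- the while-loop of A: state (remaining, sessions)
def splitLoopA (remaining : Int) (sessions : List Int) : List Int :=
  if h : remaining > 0 then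
    if remaining ≥ 3 ∧ remaining ≠ 4 then
      splitLoopA (remaining - 3) (sessions ++ [3])
    else
      splitLoopA (remaining - 2) (sessions ++ [2])
  else sessions
termination_by remaining.toNat
decreasing_by all_goals omega

def split_hours_py (total_hours : Int) : List Int :=
  if total_hours ≤ 0 then []
  else if total_hours = 3 then [3]
  else PySem.List.sorted (splitLoopA total_hours []) (fun x => x) true

-- ===== PORT B =====
def split_hours_py_alt (total_hours : Int) : List Int :=
  if total_hours ≤ 0 then []
  else if total_hours = 1 then [2]
  else
    let r := PySem.Int.mod total_hours 3
    let twos : Int := if r = 0 then 0 else if r = 2 then 1 else 2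
    let threes := PySem.Int.floordiv (total_hours - 2 * twos) 3
    List.replicate threes.toNat 3 ++ List.replicate twos.toNat 2

-- ===== PRECONDITION & SPEC =====
def Spec_split_hours_py (total_hours : Int) (out : List Int) : Prop := out = split_hours_py_alt total_hours
instance (total_hours : Int) (out : List Int) : Decidable (Spec_split_hours_py total_hours out) := by unfold Spec_split_hours_py; infer_instance

-- ===== CLAIM (what is proved, stated in full; the proofs are below) =====
def Claim_equal_split_hours_py : Prop := ∀ (total_hours : Int), Dom_split_hours_py total_hours → Spec_split_hours_py total_hours (split_hours_py total_hours)

-- ===== LEMMAS AND PROOFS =====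

-- number of 2-hour and 3-hour sessions A's loop ends with
def twA (n : Int) : Nat := if n = 1 then 1 else if n % 3 = 0 then 0 else if n % 3 = 2 then 1 else 2
def thA (n : Int) : Nat := ((n - 2 * (twA n : Int)) / 3).toNat

lemma splitLoopA_nonpos (n : Int) (acc : List Int) (h : ¬ n > 0) : splitLoopA n acc = acc := by
  rw [splitLoopA]
  simp [h]

lemma splitLoopA_acc (k : Nat) : ∀ (n : Int), n.toNat ≤ k → ∀ acc, splitLoopA n acc = acc ++ splitLoopA n [] := by
  induction k with
  | zero =>
    intro n hn acc
    have h0 : ¬ n > 0 := by omega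
    rw [splitLoopA]
    conv_rhs => rw [splitLoopA]
    simp [h0]
  | succ k ih =>
    intro n hn acc
    rw [splitLoopA]
    conv_rhs => rw [splitLoopA]
    by_cases h : n > 0
    · simp only [dif_pos h]
      by_cases h2 : n ≥ 3 ∧ n ≠ 4
      · simp only [if_pos h2]
        rw [ih (n - 3) (by omega) (acc ++ [3]), ih (n - 3) (by omega) ([] ++ [3])]
        simp
      · simp only [if_neg h2]
        rw [ih (n - 2) (by omega) (acc ++ [2]), ih (n - 2) (by omega) ([] ++ [2])]
        simp
    · simp [h]

lemma splitLoopA_closed (k : Nat) : ∀ (n : Int), n.toNat ≤ k → 0 < n →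
    splitLoopA n [] = List.replicate (thA n) 3 ++ List.replicate (twA n) 2 := by
  induction k with
  | zero => intro n hn hpos; omega
  | succ k ih =>
    intro n hn hpos
    rw [splitLoopA]
    simp only [dif_pos hpos]
    by_cases h2 : n ≥ 3 ∧ n ≠ 4
    · simp only [if_pos h2]
      rw [splitLoopA_acc k (n - 3) (by omega) ([] ++ [3])]
      by_cases h3 : n = 3
      · subst h3
        rw [show (3:Int) - 3 = 0 by norm_num, splitLoopA_nonpos 0 [] (by norm_num)]
        decide
      · have hpos' : 0 < n - 3 := by omega
        rw [ih (n - 3) (by omega) hpos']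
        have htw : twA n = twA (n - 3) := by
          unfold twA; split_ifs <;> omega
        have hth : thA n = thA (n - 3) + 1 := by
          unfold thA; rw [htw]; unfold twA; split_ifs <;> omega
        rw [htw, hth, List.replicate_succ]
        simp
    · simp only [if_neg h2]
      have : n = 1 ∨ n = 2 ∨ n = 4 := by omega
      rcases this with h | h | h <;> subst h
      · rw [show (1:Int) - 2 = -1 by norm_num, splitLoopA_nonpos (-1) _ (by norm_num)]
        decide
      · rw [show (2:Int) - 2 = 0 by norm_num, splitLoopA_nonpos 0 _ (by norm_num)]
        decide
      · rw [show (4:Int) - 2 = 2 by norm_num, splitLoopA_acc k 2 (by omega) ([] ++ [2]), splitLoopA]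
        norm_num
        rw [splitLoopA_nonpos 0 [2] (by norm_num)]
        decide

lemma splitLoopA_pairwise (a b : Nat) :
    (List.replicate a (3 : Int) ++ List.replicate b 2).Pairwise (fun x y => y ≤ x) := by
  rw [List.pairwise_append]
  refine ⟨List.pairwise_replicate.mpr (by omega), List.pairwise_replicate.mpr (by omega), ?_⟩
  intro x hx y hy
  rw [List.eq_of_mem_replicate hx, List.eq_of_mem_replicate hy]
  omega

lemma alt_closed (n : Int) (hn : 1 ≤ n) :
    split_hours_py_alt n = List.replicate (thA n) 3 ++ List.replicate (twA n) 2 := by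
  by_cases h1 : n = 1
  · subst h1; decide
  · unfold split_hours_py_alt
    have h0 : ¬ n ≤ 0 := by omega
    simp only [if_neg h0, if_neg h1]
    rw [PySem.Int.mod_eq_emod_of_pos (by norm_num : (0:Int) < 3)]
    have hmr : n % 3 = 0 ∨ n % 3 = 1 ∨ n % 3 = 2 := by omega
    rcases hmr with h | h | h
    · simp only [h]
      norm_num
      have htw : twA n = 0 := by unfold twA; split_ifs <;> omega
      have hth : thA n = (n / 3).toNat := by unfold thA; rw [htw]; norm_num
      rw [htw, hth]
      simp
    · simp only [h]
      norm_num
      have htw : twA n = 2 := by unfold twA; split_ifs <;> omega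
      have hth : thA n = ((n - 4) / 3).toNat := by unfold thA; rw [htw]; norm_num
      rw [htw, hth]
      norm_num
      decide
    · simp only [h]
      norm_num
      have htw : twA n = 1 := by unfold twA; split_ifs <;> omega
      have hth : thA n = ((n - 2) / 3).toNat := by unfold thA; rw [htw]; norm_num
      rw [htw, hth]
      norm_num

-- ===== VERDICT (by name: the statement is the Claim_ definition above) =====
theorem split_hours_py_spec : Claim_equal_split_hours_py := by
  intro n _
  unfold Spec_split_hours_py split_hours_py
  by_cases h0 : n ≤ 0
  · simp [h0, split_hours_py_alt]
  · simp only [if_neg h0]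
    by_cases h3 : n = 3
    · subst h3; decide
    · simp only [if_neg h3]
      have hpos : 0 < n := by omega
      have hn1 : 1 ≤ n := by omega
      have hp : (List.replicate (thA n) (3:Int) ++ List.replicate (twA n) 2).Pairwise
          (fun a b => (fun x : Int => x) b ≤ (fun x : Int => x) a) := by
        simpa using splitLoopA_pairwise (thA n) (twA n)
      rw [splitLoopA_closed n.toNat n (le_refl _) hpos,
        PySem.List.sorted_rev_eq_self_of_pairwise _ _ hp, alt_closed n hn1]
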